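-- pv_equiv track=rewrite | github.com/colin-whittaker/aoc2023 | d02.py | check_game1
-- ===== SOURCE A (Python) =====
-- def check_game1(game):
--     for show in game:
--         for x,y in show.items():
--             if x == 'red' and y >12:
--                 return False
--             if x == 'green' and y >13:
--                 return False
--             if x == 'blue' and y >14:
--                 return False
--     return True
-- ===== SOURCE B (Python) =====
-- LIMITS = {'red': 12, 'green': 13, 'blue': 14}
--
-- def check_game1(game):
--     maxes = {}
--     for show in game:
--         for x, y in show.items():
--             if x in LIMITS:
--                 maxes[x] = max(maxes.get(x, 0), y)
--     return all(maxes.get(c, 0) <= lim for c, lim in LIMITS.items())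
-- ===== Notes on version B (the rewrite author's own statement) =====
-- stated objective: alternative
-- what changed: B replaces A's interleaved short-circuit per-pair checks with a two-pass shape: one aggregation pass building a dict of per-color maxima, then a scan of the limits table.
import Mathlib
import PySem

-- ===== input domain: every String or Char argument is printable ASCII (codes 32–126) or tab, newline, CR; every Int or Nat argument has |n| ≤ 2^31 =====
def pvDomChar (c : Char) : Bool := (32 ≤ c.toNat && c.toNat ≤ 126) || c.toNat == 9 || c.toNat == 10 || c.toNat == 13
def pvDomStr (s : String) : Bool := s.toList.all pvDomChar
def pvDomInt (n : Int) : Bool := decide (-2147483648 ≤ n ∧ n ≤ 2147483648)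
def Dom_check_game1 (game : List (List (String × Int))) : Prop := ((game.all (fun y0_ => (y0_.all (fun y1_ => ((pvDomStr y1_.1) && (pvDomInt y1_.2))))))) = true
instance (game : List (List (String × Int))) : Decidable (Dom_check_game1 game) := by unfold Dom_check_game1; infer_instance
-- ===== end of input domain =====

-- B replaces A's interleaved short-circuit checks with a build-maxima-dict pass then a scan of the limits table (alternative decomposition, same cost).


-- ===== PORT A =====
-- inner 'for x,y in show.items()' loop with its early returns
def check_game1_show : List (String × Int) → Bool
  | [] => true
  | (x, y) :: t =>
    if x = "red" ∧ y > 12 then false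
    else if x = "green" ∧ y > 13 then false
    else if x = "blue" ∧ y > 14 then false
    else check_game1_show t

def check_game1 (game : List (List (String × Int))) : Bool :=
  match game with
  | [] => true
  | sh :: rest => if check_game1_show sh then check_game1 rest else false

-- ===== PORT B =====
def pvLimits : PySem.Dict String Int := PySem.Dict.ofList [("red", 12), ("green", 13), ("blue", 14)]

def pvStep (m : PySem.Dict String Int) (p : String × Int) : PySem.Dict String Int :=
  if pvLimits.contains p.1 then m.modify p.1 0 (fun v => max v p.2) else m

def check_game1_alt (game : List (List (String × Int))) : Bool :=
  let maxes := game.foldl (fun m sh => sh.foldl pvStep m) PySem.Dict.empty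
  pvLimits.items.all (fun cl => maxes.getD cl.1 0 ≤ cl.2)

-- ===== PRECONDITION & SPEC =====
def Spec_check_game1 (game : List (List (String × Int))) (out : Bool) : Prop := out = check_game1_alt game
instance (game : List (List (String × Int))) (out : Bool) : Decidable (Spec_check_game1 game out) := by unfold Spec_check_game1; infer_instance

-- ===== CLAIM (what is proved, stated in full; the proofs are below) =====
def Claim_equal_check_game1 : Prop := ∀ (game : List (List (String × Int))), Dom_check_game1 game → Spec_check_game1 game (check_game1 game)

-- ===== LEMMAS AND PROOFS =====

-- getD of the step function, split on whether the pair's key is the queried color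
lemma getD_pvStep (m : PySem.Dict String Int) (p : String × Int) (c : String)
    (hc : pvLimits.contains c = true) :
    (pvStep m p).getD c 0 = if p.1 = c then max (m.getD c 0) p.2 else m.getD c 0 := by
  unfold pvStep
  by_cases h : p.1 = c
  · subst h; simp [hc, PySem.Dict.getD_modify_self]
  · split_ifs with h2
    · exact PySem.Dict.getD_modify_of_ne _ _ _ (fun he => h he.symm)
    · rfl

-- the maximum tracked for color c stays ≤ lim iff it was and every c-pair in the show is ≤ lim
lemma show_fold_le (c : String) (hc : pvLimits.contains c = true) (lim : Int) :
    ∀ (sh : List (String × Int)) (m : PySem.Dict String Int),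
      ((sh.foldl pvStep m).getD c 0 ≤ lim ↔
        m.getD c 0 ≤ lim ∧ ∀ p ∈ sh, p.1 = c → p.2 ≤ lim) := by
  intro sh
  induction sh with
  | nil => intro m; simp
  | cons p t ih =>
    intro m
    simp only [List.foldl_cons, ih, getD_pvStep m p c hc, List.forall_mem_cons]
    by_cases h : p.1 = c
    · simp only [h, if_true, max_le_iff, forall_const]
      tauto
    · simp only [h, IsEmpty.forall_iff, true_and]
      tauto

lemma game_fold_le (c : String) (hc : pvLimits.contains c = true) (lim : Int) :
    ∀ (game : List (List (String × Int))) (m : PySem.Dict String Int),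
      ((game.foldl (fun m sh => sh.foldl pvStep m) m).getD c 0 ≤ lim ↔
        m.getD c 0 ≤ lim ∧ ∀ sh ∈ game, ∀ p ∈ sh, p.1 = c → p.2 ≤ lim) := by
  intro game
  induction game with
  | nil => intro m; simp
  | cons sh rest ih =>
    intro m
    simp only [List.foldl_cons, ih, show_fold_le c hc lim sh m, List.forall_mem_cons]
    tauto

lemma alt_true_iff (game : List (List (String × Int))) :
    check_game1_alt game = true ↔
      ∀ sh ∈ game, ∀ p ∈ sh,
        (p.1 = "red" → p.2 ≤ 12) ∧ (p.1 = "green" → p.2 ≤ 13) ∧ (p.1 = "blue" → p.2 ≤ 14) := by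
  have hr : pvLimits.contains "red" = true := by decide
  have hg : pvLimits.contains "green" = true := by decide
  have hb : pvLimits.contains "blue" = true := by decide
  have hit : pvLimits.items = [("red", 12), ("green", 13), ("blue", 14)] := by decide
  unfold check_game1_alt
  rw [hit]
  simp only [List.all_cons, List.all_nil, Bool.and_true, Bool.and_eq_true, decide_eq_true_eq]
  rw [game_fold_le "red" hr 12 game, game_fold_le "green" hg 13 game,
    game_fold_le "blue" hb 14 game]
  simp only [PySem.Dict.getD_empty]
  constructor
  · rintro ⟨⟨-, h1⟩, ⟨-, h2⟩, -, h3⟩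
    exact fun sh hs p hp => ⟨h1 sh hs p hp, h2 sh hs p hp, h3 sh hs p hp⟩
  · intro h
    exact ⟨⟨by norm_num, fun sh hs p hp => (h sh hs p hp).1⟩,
      ⟨by norm_num, fun sh hs p hp => (h sh hs p hp).2.1⟩,
      by norm_num, fun sh hs p hp => (h sh hs p hp).2.2⟩

lemma show_true_iff (sh : List (String × Int)) :
    check_game1_show sh = true ↔
      ∀ p ∈ sh, (p.1 = "red" → p.2 ≤ 12) ∧ (p.1 = "green" → p.2 ≤ 13) ∧ (p.1 = "blue" → p.2 ≤ 14) := by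
  induction sh with
  | nil => simp [check_game1_show]
  | cons p t ih =>
    obtain ⟨x, y⟩ := p
    simp only [check_game1_show, List.forall_mem_cons]
    split_ifs with h1 h2 h3
    · simp only [false_iff]
      intro h
      obtain ⟨hx, hy⟩ := h1
      have := h.1.1 hx; omega
    · simp only [false_iff]
      intro h
      obtain ⟨hx, hy⟩ := h2
      have := h.1.2.1 hx; omega
    · simp only [false_iff]
      intro h
      obtain ⟨hx, hy⟩ := h3
      have := h.1.2.2 hx; omega
    · rw [ih]
      have k1 : x = "red" → y ≤ 12 := fun hx => not_lt.mp (fun hgt => h1 ⟨hx, hgt⟩)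
      have k2 : x = "green" → y ≤ 13 := fun hx => not_lt.mp (fun hgt => h2 ⟨hx, hgt⟩)
      have k3 : x = "blue" → y ≤ 14 := fun hx => not_lt.mp (fun hgt => h3 ⟨hx, hgt⟩)
      exact ⟨fun h => ⟨⟨k1, k2, k3⟩, h⟩, fun h => h.2⟩

lemma a_true_iff (game : List (List (String × Int))) :
    check_game1 game = true ↔
      ∀ sh ∈ game, ∀ p ∈ sh,
        (p.1 = "red" → p.2 ≤ 12) ∧ (p.1 = "green" → p.2 ≤ 13) ∧ (p.1 = "blue" → p.2 ≤ 14) := by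
  induction game with
  | nil => simp [check_game1]
  | cons sh rest ih =>
    simp only [check_game1, List.forall_mem_cons]
    split_ifs with h
    · rw [ih]
      exact and_iff_right_of_imp (fun _ => (show_true_iff sh).1 h) |>.symm
    · simp only [false_iff, not_and]
      intro hsh _
      exact h ((show_true_iff sh).2 hsh)

-- ===== VERDICT (by name: the statement is the Claim_ definition above) =====
theorem check_game1_spec : Claim_equal_check_game1 := by
  intro game _
  unfold Spec_check_game1
  rw [Bool.eq_iff_iff, a_true_iff, alt_true_iff]
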